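-- pv_equiv track=rewrite | github.com/Juyoung4/StudyAlgorithm | Programmers/LEVEL1/python/35.py | solution
-- ===== SOURCE A (Python) =====
-- def solution(d, budget):
--     count=0
--     while not budget < 0:
--         if not d:
--             count+=1
--             break
--         budget -= min(d)
--         d.remove(min(d))
--         count += 1
--     return count-1
-- ===== SOURCE B (Python) =====
-- def solution(d, budget):
--     sums = [0]
--     for x in sorted(d):
--         sums.append(sums[-1] + x)
--     ans = -1
--     for p in sums:
--         if p > budget:
--             break
--         ans += 1
--     return ans
-- ===== Notes on version B (the rewrite author's own statement) =====
-- stated objective: faster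
-- what changed: A repeatedly computes min(d) and removes it from the list (quadratic); B sorts once and scans prefix sums until the budget is exceeded.
import Mathlib
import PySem

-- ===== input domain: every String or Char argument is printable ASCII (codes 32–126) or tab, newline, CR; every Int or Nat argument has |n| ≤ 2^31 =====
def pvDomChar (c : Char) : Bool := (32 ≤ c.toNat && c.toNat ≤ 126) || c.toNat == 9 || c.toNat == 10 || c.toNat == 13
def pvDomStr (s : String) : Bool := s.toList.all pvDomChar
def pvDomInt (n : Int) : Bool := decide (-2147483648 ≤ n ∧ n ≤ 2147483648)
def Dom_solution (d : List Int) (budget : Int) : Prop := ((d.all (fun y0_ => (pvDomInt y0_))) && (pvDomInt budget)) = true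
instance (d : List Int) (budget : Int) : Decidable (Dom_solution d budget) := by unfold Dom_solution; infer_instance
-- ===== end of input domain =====

-- B replaces A's quadratic repeated min+remove loop by sort + prefix sums;
-- equivalence is about the RETURN value only: A mutates d in place (remove), B does not.

-- ===== PORT A =====
-- the while loop: state (d, budget, count); each non-break iteration removes min(d) from d
def solutionLoopA (d : List Int) (budget count : Int) : Int :=
  if ¬ budget < 0 then
    if h : d = [] then count + 1
    else
      let m := (PySem.List.min? d (fun x => x)).getD 0
      solutionLoopA ((PySem.List.remove? d m).getD d) (budget - m) (count + 1)
  else count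
termination_by d.length
decreasing_by
  obtain ⟨m, hmin⟩ : ∃ m, PySem.List.min? d (fun x => x) = some m := by
    cases hc : PySem.List.min? d (fun x => x) with
    | none => exact absurd ((PySem.List.min?_eq_none_iff d _).mp hc) h
    | some m => exact ⟨m, rfl⟩
  have hm : m ∈ d := PySem.List.min?_mem hmin
  simp only [hmin, Option.getD_some, PySem.List.remove?_eq_some_erase d m hm]
  have := List.length_erase_of_mem hm
  have hd : 0 < d.length := List.length_pos_of_mem hm
  omega

def solution (d : List Int) (budget : Int) : Int :=
  solutionLoopA d budget 0 - 1

-- ===== PORT B =====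
-- first loop of Source B: sums = [0]; for x in sorted(d): sums.append(sums[-1] + x)
def buildSums (xs : List Int) : List Int :=
  xs.foldl (fun sums x => sums ++ [PySem.List.pyGetD sums (-1) 0 + x]) [0]

-- second loop of Source B: ans = -1; for p in sums: if p > budget: break; ans += 1
def countLoop (budget : Int) : List Int → Int → Int
  | [], ans => ans
  | p :: ps, ans => if p > budget then ans else countLoop budget ps (ans + 1)

def solution_alt (d : List Int) (budget : Int) : Int :=
  countLoop budget (buildSums (PySem.List.sorted d (fun x => x) false)) (-1)

-- ===== PRECONDITION & SPEC =====
def Spec_solution (d : List Int) (budget : Int) (out : Int) : Prop := out = solution_alt d budget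
instance (d : List Int) (budget : Int) (out : Int) : Decidable (Spec_solution d budget out) := by unfold Spec_solution; infer_instance

-- ===== CLAIM (what is proved, stated in full; the proofs are below) =====
def Claim_equal_solution : Prop := ∀ (d : List Int) (budget : Int), Dom_solution d budget → Spec_solution d budget (solution d budget)

-- ===== LEMMAS AND PROOFS =====

-- common reference loop: scan a (sorted) list front to back, in A's loop shape
def loopS : List Int → Int → Int → Int
  | [], b, c => if b < 0 then c else c + 1
  | x :: xs, b, c => if b < 0 then c else loopS xs (b - x) (c + 1)

-- prefix sums starting at s (proof-side view of buildSums)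
def psums (s : Int) : List Int → List Int
  | [] => [s]
  | x :: xs => s :: psums (s + x) xs

-- sorted d starts with min d, followed by sorted (d.erase (min d))
theorem sorted_cons_min (d : List Int) (m : Int)
    (hmin : PySem.List.min? d (fun x => x) = some m) :
    PySem.List.sorted d (fun x => x) false
      = m :: PySem.List.sorted (d.erase m) (fun x => x) false := by
  have hm : m ∈ d := PySem.List.min?_mem hmin
  apply PySem.List.sorted_id_eq_of_perm_of_pairwise
  · exact ((PySem.List.sorted_perm _ _ _).cons m).trans (List.perm_cons_erase hm).symm
  · refine List.pairwise_cons.mpr ⟨?_, ?_⟩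
    · intro y hy
      have hy' : y ∈ d.erase m := (PySem.List.mem_sorted _ _ _ _).mp hy
      exact PySem.List.min?_isMin hmin y (List.mem_of_mem_erase hy')
    · simpa using PySem.List.sorted_pairwise (d.erase m) (fun x => x)

theorem loopA_eq_loopS : ∀ n (d : List Int), d.length ≤ n → ∀ b c,
    solutionLoopA d b c = loopS (PySem.List.sorted d (fun x => x) false) b c := by
  intro n
  induction n with
  | zero =>
    intro d hd b c
    have hnil : d = [] := List.eq_nil_of_length_eq_zero (Nat.le_zero.mp hd)
    subst hnil
    rw [show PySem.List.sorted ([] : List Int) (fun x => x) false = [] from rfl]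
    rw [solutionLoopA.eq_def]
    unfold loopS
    split_ifs <;> simp_all
  | succ n ih =>
    intro d hd b c
    rcases hd' : d with _ | ⟨x, xs⟩
    · rw [show PySem.List.sorted ([] : List Int) (fun x => x) false = [] from rfl]
      rw [solutionLoopA.eq_def]
      unfold loopS
      split_ifs <;> simp_all
    · subst hd'
      obtain ⟨m, hmin⟩ : ∃ m, PySem.List.min? (x :: xs) (fun y => y) = some m := by
        cases hc : PySem.List.min? (x :: xs) (fun y => y) with
        | none => exact absurd ((PySem.List.min?_eq_none_iff _ _).mp hc) (by simp)
        | some m => exact ⟨m, rfl⟩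
      have hm : m ∈ x :: xs := PySem.List.min?_mem hmin
      rw [sorted_cons_min _ m hmin]
      rw [solutionLoopA.eq_def]
      unfold loopS
      simp only [hmin, Option.getD_some, PySem.List.remove?_eq_some_erase _ m hm]
      by_cases hb : b < 0
      · simp [hb]
      · have hlen : ((x :: xs).erase m).length ≤ n := by
          have := List.length_erase_of_mem hm
          have : 0 < (x :: xs).length := List.length_pos_of_mem hm
          simp_all
        simp only [hb, not_false_eq_true, if_true,
          dif_neg (by simp : ¬ (x :: xs) = [])]
        exact ih _ hlen _ _

theorem buildSums_eq_psums (l : List Int) : buildSums l = psums 0 l := by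
  suffices h : ∀ (l : List Int) (acc : List Int) (s : Int),
      List.foldl (fun sums x => sums ++ [PySem.List.pyGetD sums (-1) 0 + x]) (acc ++ [s]) l
        = acc ++ psums s l by
    simpa [buildSums] using h l [] 0
  intro l
  induction l with
  | nil => intro acc s; simp [psums]
  | cons x xs ih =>
    intro acc s
    simp only [List.foldl_cons, PySem.List.pyGetD_neg_one_append_singleton, psums]
    rw [ih (acc ++ [s]) (s + x)]
    simp

theorem countLoop_psums : ∀ (l : List Int) (b s ans : Int),
    countLoop b (psums s l) ans = loopS l (b - s) (ans + 1) - 1 := by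
  intro l
  induction l with
  | nil =>
    intro b s ans
    simp only [psums, countLoop, loopS]
    by_cases h : s > b
    · rw [if_pos h, if_pos (by omega)]; omega
    · rw [if_neg h, if_neg (by omega)]; omega
  | cons x xs ih =>
    intro b s ans
    simp only [psums, countLoop, loopS]
    by_cases h : s > b
    · rw [if_pos h, if_pos (by omega)]; omega
    · rw [if_neg h, if_neg (by omega), ih]
      rw [show b - s - x = b - (s + x) by ring]

-- ===== VERDICT (by name: the statement is the Claim_ definition above) =====
theorem solution_spec : Claim_equal_solution := by
  intro d budget _
  unfold Spec_solution solution solution_alt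
  rw [buildSums_eq_psums, countLoop_psums, loopA_eq_loopS d.length d le_rfl]
  norm_num
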